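-- pv_equiv track=rewrite | github.com/hbyyy/codingTest | 프로그래머스/2019카카오인턴/불량사용자.py | solution
-- ===== SOURCE A (Python) =====
-- from itertools import product
--
-- def check(u_id, b_id):
--     if len(u_id) != len(b_id):
--         return False
--     for a, b in zip(u_id, b_id):
--         if a != b and b != '*':
--             return False
--     return True
--
-- def solution(user_id, banned_id):
--     tmp = {}
--     for id in banned_id:
--         tmp[id] = []
--
--     for b_id in banned_id:
--         if tmp[b_id]:
--             continue
--         for u_id in user_id:
--             if check(u_id, b_id):
--                 tmp[b_id].append(u_id)
--
--     result = set()
--     for i in list(product(*[tmp[b_id] for b_id in banned_id])):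
--         if len(set(i)) != len(i):
--             continue
--         result.add(frozenset(i))
--     return len(result)
-- ===== SOURCE B (Python) =====
-- def _match_chars(u, b):
--     for uc, bc in zip(u, b):
--         if bc != '*' and uc != bc:
--             return False
--     return True
--
-- def solution(user_id, banned_id):
--     by_len = {}
--     for u in user_id:
--         by_len.setdefault(len(u), []).append(u)
--     exact_of = {}
--     for u in user_id:
--         exact_of.setdefault(u, []).append(u)
--     cand_of = {}
--     for b in banned_id:
--         if b not in cand_of:
--             if '*' in b:
--                 cand_of[b] = [u for u in by_len.get(len(b), []) if _match_chars(u, b)]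
--             else:
--                 cand_of[b] = exact_of.get(b, [])
--     if any(not cand_of[b] for b in banned_id):
--         return 0
--     partial = {frozenset()}
--     for b in banned_id:
--         nxt = set()
--         for used in partial:
--             for u in cand_of[b]:
--                 if u not in used:
--                     nxt.add(used | {u})
--         partial = nxt
--     return len(partial)
-- ===== Notes on version B (the rewrite author's own statement) =====
-- stated objective: faster
-- what changed: B computes candidate lists once per distinct pattern via an exact-match dict (star-free patterns) and length buckets instead of scanning all users for every banned id, returns 0 early when some pattern has no candidate, and replaces A's materialised cartesian product (filtered for duplicates afterwards) by a level-by-level sweep that extends and deduplicates partial frozensets at every level.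
import Mathlib
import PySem

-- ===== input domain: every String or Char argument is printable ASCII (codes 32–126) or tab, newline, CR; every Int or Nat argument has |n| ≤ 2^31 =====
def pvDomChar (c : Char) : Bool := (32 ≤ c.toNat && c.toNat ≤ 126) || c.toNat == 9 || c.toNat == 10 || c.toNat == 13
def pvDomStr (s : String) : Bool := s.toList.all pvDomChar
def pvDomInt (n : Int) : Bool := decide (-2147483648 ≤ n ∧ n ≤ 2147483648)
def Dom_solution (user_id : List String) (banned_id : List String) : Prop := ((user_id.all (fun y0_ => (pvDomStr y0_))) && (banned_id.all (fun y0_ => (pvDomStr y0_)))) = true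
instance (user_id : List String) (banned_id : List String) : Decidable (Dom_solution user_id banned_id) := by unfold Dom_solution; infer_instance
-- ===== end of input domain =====

-- B is faster: it looks candidates up via exact-match / length buckets instead of scanning all
-- users per pattern, returns 0 early when some pattern has no candidate, and replaces A's full
-- cartesian-product enumeration by a level-by-level sweep that dedups partial frozensets.

-- Model of Python's frozenset(i) shared by both ports: the sorted list of the distinct
-- elements — two frozensets are equal iff these canonical lists are equal (exact model).
def canonFS (l : List String) : List String :=
  PySem.List.sorted (PySem.Set.ofList l) (fun x => x) false

-- ===== PORT A =====
-- check(u_id, b_id): early-return loop over zip ported as .all of the negated bad test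
def check (u_id : String) (b_id : String) : Bool :=
  if PySem.Str.len u_id ≠ PySem.Str.len b_id then false
  else (u_id.toList.zip b_id.toList).all (fun ab => !(ab.1 != ab.2 && ab.2 != '*'))

-- itertools.product(*lists): leftmost index varies slowest
def pyProduct (ls : List (List String)) : List (List String) :=
  match ls with
  | [] => [[]]
  | c :: cs => c.flatMap (fun x => (pyProduct cs).map (fun t => x :: t))

def solution (user_id : List String) (banned_id : List String) : Int :=
  let tmp0 : PySem.Dict String (List String) :=
    banned_id.foldl (fun d id => d.insert id []) PySem.Dict.empty
  let tmp : PySem.Dict String (List String) :=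
    banned_id.foldl (fun d b_id =>
      if d.getD b_id [] ≠ [] then d
      else user_id.foldl
        (fun d' u_id => if check u_id b_id then d'.modify b_id [] (fun l => l ++ [u_id]) else d')
        d) tmp0
  let result : PySem.Set (List String) :=
    (pyProduct (banned_id.map (fun b_id => tmp.getD b_id []))).foldl
      (fun r i =>
        if (PySem.Set.ofList i).length ≠ i.length then r
        else PySem.Set.add r (canonFS i)) PySem.Set.empty
  (result.length : Int)

-- ===== PORT B =====
-- _match_chars(u, b): position-wise test (callers guarantee equal lengths)
def matchChars (u : String) (b : String) : Bool :=
  (u.toList.zip b.toList).all (fun p => !(p.2 != '*' && p.1 != p.2))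

def solution_alt (user_id : List String) (banned_id : List String) : Int :=
  let byLen : PySem.Dict Int (List String) :=
    user_id.foldl (fun d u => d.modify (PySem.Str.len u) [] (fun l => l ++ [u])) PySem.Dict.empty
  let exactOf : PySem.Dict String (List String) :=
    user_id.foldl (fun d u => d.modify u [] (fun l => l ++ [u])) PySem.Dict.empty
  let candOf : PySem.Dict String (List String) :=
    banned_id.foldl (fun d b =>
      if d.contains b then d
      else if PySem.Str.isIn "*" b then
        d.insert b ((byLen.getD (PySem.Str.len b) []).filter (fun u => matchChars u b))
      else d.insert b (exactOf.getD b [])) PySem.Dict.empty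
  if banned_id.any (fun b => (candOf.getD b []).isEmpty) then 0
  else
    -- partial is a set of frozensets; each frozenset is modelled by its canonical sorted list,
    -- and "used | {u}" is canonFS (used ++ [u])
    ((banned_id.foldl (fun part b =>
        part.foldl (fun nxt used =>
          (candOf.getD b []).foldl (fun nxt2 u =>
            if u ∈ used then nxt2 else PySem.Set.add nxt2 (canonFS (used ++ [u]))) nxt)
          PySem.Set.empty)
        [([] : List String)]).length : Int)

-- ===== PRECONDITION & SPEC =====
def Spec_solution (user_id : List String) (banned_id : List String) (out : Int) : Prop := out = solution_alt user_id banned_id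
instance (user_id : List String) (banned_id : List String) (out : Int) : Decidable (Spec_solution user_id banned_id out) := by unfold Spec_solution; infer_instance

-- ===== CLAIM (what is proved, stated in full; the proofs are below) =====
def Claim_equal_solution : Prop := ∀ (user_id : List String) (banned_id : List String), Dom_solution user_id banned_id → Spec_solution user_id banned_id (solution user_id banned_id)

-- ===== LEMMAS AND PROOFS =====

-- "len(set(i)) == len(i)" is exactly: i has no duplicates
theorem ofList_len_iff (t : List String) : (PySem.Set.ofList t).length = t.length ↔ t.Nodup := by
  constructor
  · intro h
    have hnd := PySem.Set.nodup_ofList (xs := t)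
    have hsub : PySem.Set.ofList t ⊆ t := fun x hx => (PySem.Set.mem_ofList t x).1 hx
    have hsp : List.Subperm (PySem.Set.ofList t) t := List.subperm_of_subset hnd hsub
    exact (hsp.perm_of_length_le (le_of_eq h.symm)).nodup hnd
  · intro h
    rw [PySem.Set.ofList_eq_self_of_nodup t h]

-- A's skip-duplicates loop over the product is a filter by Nodup followed by set insertions
theorem foldA (L : List (List String)) (r : PySem.Set (List String)) :
    L.foldl (fun r i => if (PySem.Set.ofList i).length ≠ i.length then r else PySem.Set.add r (canonFS i)) r
      = ((L.filter (fun t => decide t.Nodup)).map canonFS).foldl PySem.Set.add r := by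
  induction L generalizing r with
  | nil => rfl
  | cons t L ih =>
    by_cases h : t.Nodup
    · have h' : (PySem.Set.ofList t).length = t.length := (ofList_len_iff t).2 h
      simp only [List.foldl_cons, List.filter_cons, h, decide_true, if_pos, h', ne_eq,
        not_true_eq_false, if_false, List.map_cons]
      exact ih _
    · have h' : (PySem.Set.ofList t).length ≠ t.length := fun hc => h ((ofList_len_iff t).1 hc)
      simp only [List.foldl_cons, List.filter_cons, h, decide_false, if_neg, h', ne_eq,
        not_false_eq_true, if_true, Bool.false_eq_true]
      exact ih _

-- the inner "for u in user_id: if check(u,b): tmp[b].append(u)" loop, at every key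
theorem inner_getD (user_id : List String) (b k : String) (d : PySem.Dict String (List String)) :
    (user_id.foldl (fun d' u => if check u b then d'.modify b [] (fun l => l ++ [u]) else d') d).getD k []
      = d.getD k [] ++ (if k = b then user_id.filter (fun u => check u b) else []) := by
  rw [PySem.List.foldl_if_eq_foldl_filter]
  rw [show (user_id.filter (fun u => check u b)).foldl
        (fun d' u => d'.modify b [] (fun l => l ++ [u])) d
      = ((user_id.filter (fun u => check u b)).map (fun u => (b, u))).foldl
        (fun d' p => d'.modify p.1 [] (fun l => l ++ [p.2])) d from (List.foldl_map (f := fun u => (b, u)) (g := fun (d' : PySem.Dict String (List String)) (p : String × String) => d'.modify p.1 [] fun l => l ++ [p.2]) (l := user_id.filter (fun u => check u b)) (init := d)).symm]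
  rw [PySem.Dict.getD_foldl_modify_append]
  congr 1
  rw [List.filter_map, List.map_map]
  by_cases hkb : k = b
  · subst hkb
    simp [Function.comp_def]
  · have hcst : (fun (u : String) => ((b, u).1 == k)) = (fun _ => (false : Bool)) := by
      funext u
      simp only [beq_eq_false_iff_ne, ne_eq]
      exact fun hc => hkb hc.symm
    simp [Function.comp_def, hkb, Ne.symm hkb]

def candF (user_id : List String) (b : String) : List String :=
  user_id.filter (fun u => check u b)

-- one step of A's candidate-filling loop, at every key
theorem step_getD (user_id : List String) (d : PySem.Dict String (List String)) (c k : String) :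
    ((fun d b_id => if d.getD b_id [] ≠ [] then d
        else user_id.foldl (fun d' u => if check u b_id then d'.modify b_id [] (fun l => l ++ [u]) else d') d) d c).getD k []
      = if d.getD c [] ≠ [] then d.getD k []
        else d.getD k [] ++ (if k = c then candF user_id c else []) := by
  by_cases hc : d.getD c [] = []
  · simp only [hc, ne_eq, not_true_eq_false, if_false]
    exact inner_getD user_id c k d
  · simp only [hc, ne_eq, not_false_eq_true, if_true]

-- invariant of A's candidate-filling loop: processed keys hold their filtered candidates
theorem fold2 (user_id : List String) (L : List String) :
    ∀ (d : PySem.Dict String (List String)),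
    (∀ k, d.getD k [] = [] ∨ d.getD k [] = candF user_id k) →
    (∀ k, (L.foldl (fun d b_id => if d.getD b_id [] ≠ [] then d
        else user_id.foldl (fun d' u => if check u b_id then d'.modify b_id [] (fun l => l ++ [u]) else d') d) d).getD k [] = []
      ∨ (L.foldl (fun d b_id => if d.getD b_id [] ≠ [] then d
        else user_id.foldl (fun d' u => if check u b_id then d'.modify b_id [] (fun l => l ++ [u]) else d') d) d).getD k [] = candF user_id k) ∧
    (∀ b, (b ∈ L ∨ d.getD b [] = candF user_id b) →
      (L.foldl (fun d b_id => if d.getD b_id [] ≠ [] then d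
        else user_id.foldl (fun d' u => if check u b_id then d'.modify b_id [] (fun l => l ++ [u]) else d') d) d).getD b [] = candF user_id b) := by
  induction L with
  | nil =>
    intro d hP
    refine ⟨hP, fun b hb => ?_⟩
    rcases hb with hb | hb
    · exact absurd hb (List.not_mem_nil)
    · exact hb
  | cons c L ih =>
    intro d hP
    simp only [List.foldl_cons]
    set d' := (fun d b_id => if d.getD b_id [] ≠ [] then d
        else user_id.foldl (fun d'' u => if check u b_id then d''.modify b_id [] (fun l => l ++ [u]) else d'') d) d c with hd'
    have hP' : ∀ k, d'.getD k [] = [] ∨ d'.getD k [] = candF user_id k := by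
      intro k
      rw [hd', step_getD]
      by_cases hc : d.getD c [] = []
      · simp only [hc, ne_eq, not_true_eq_false, if_false]
        by_cases hkc : k = c
        · subst hkc; rw [hc]; right; simp [candF]
        · simp only [hkc, if_false, List.append_nil]; exact hP k
      · simp only [hc, ne_eq, not_false_eq_true, if_true]; exact hP k
    have hc' : d'.getD c [] = candF user_id c := by
      rw [hd', step_getD]
      by_cases hc : d.getD c [] = []
      · simp [hc, candF]
      · simp only [hc, ne_eq, not_false_eq_true, if_true]
        rcases hP c with h | h
        · exact absurd h hc
        · exact h
    have hkeep : ∀ b, d.getD b [] = candF user_id b → d'.getD b [] = candF user_id b := by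
      intro b hb
      rw [hd', step_getD]
      by_cases hc : d.getD c [] = []
      · by_cases hbc : b = c
        · subst hbc
          have hnil : candF user_id b = [] := hb.symm.trans hc
          simp [hc, hnil]
        · simp [hc, hbc, hb]
      · simp only [hc, ne_eq, not_false_eq_true, if_true]; exact hb
    refine ⟨(ih d' hP').1, fun b hb => ?_⟩
    apply (ih d' hP').2
    rcases hb with hb | hb
    · rcases List.mem_cons.1 hb with hbc | hbL
      · subst hbc; exact Or.inr hc'
      · exact Or.inl hbL
    · exact Or.inr (hkeep b hb)

-- A's first loop only installs empty lists
theorem tmp0_getD (L : List String) :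
    ∀ (d : PySem.Dict String (List String)), (∀ k, d.getD k [] = []) →
    ∀ k, (L.foldl (fun d id => d.insert id []) d).getD k [] = [] := by
  induction L with
  | nil => intro d hd k; exact hd k
  | cons c L ih =>
    intro d hd k
    simp only [List.foldl_cons]
    apply ih
    intro k'
    rw [PySem.Dict.getD_insert]
    split <;> [rfl; exact hd k']

-- B's grouping loops ("d.setdefault(key(u), []).append(u)"), at every key
theorem group_getD {κ : Type} [BEq κ] [LawfulBEq κ] (key : String → κ)
    (l : List String) (k : κ) (d : PySem.Dict κ (List String)) :
    (l.foldl (fun d u => d.modify (key u) [] (fun s => s ++ [u])) d).getD k []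
      = d.getD k [] ++ l.filter (fun u => key u == k) := by
  rw [show l.foldl (fun d u => d.modify (key u) [] (fun s => s ++ [u])) d
      = (l.map (fun u => (key u, u))).foldl (fun d p => d.modify p.1 [] (fun s => s ++ [p.2])) d from
      (List.foldl_map (f := fun u => (key u, u)) (g := fun (d : PySem.Dict κ (List String)) (p : κ × String) => d.modify p.1 [] fun s => s ++ [p.2]) (l := l) (init := d)).symm]
  rw [PySem.Dict.getD_foldl_modify_append]
  congr 1
  rw [List.filter_map, List.map_map]
  simp [Function.comp_def]

-- frozenset model: membership, distinctness, extensionality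
theorem mem_canonFS (y : String) (l : List String) : y ∈ canonFS l ↔ y ∈ l := by
  unfold canonFS
  rw [(PySem.List.sorted_perm (PySem.Set.ofList l) (fun x => x) false).mem_iff]
  exact PySem.Set.mem_ofList l y

theorem canonFS_congr {a b : List String} (h : ∀ y, y ∈ a ↔ y ∈ b) : canonFS a = canonFS b := by
  unfold canonFS
  rw [PySem.List.sorted_id_eq_sorted_id_iff_perm]
  refine (List.perm_ext_iff_of_nodup (PySem.Set.nodup_ofList (xs := a))
    (PySem.Set.nodup_ofList (xs := b))).2 fun y => ?_
  rw [PySem.Set.mem_ofList, PySem.Set.mem_ofList]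
  exact h y

-- charwise test of B equals charwise test of A
theorem matchChars_pred :
    (fun (p : Char × Char) => !(p.2 != '*' && p.1 != p.2)) = (fun (p : Char × Char) => !(p.1 != p.2 && p.2 != '*')) := by
  funext p
  rw [Bool.and_comm]

-- on users of matching length, B's charwise test is A's check
theorem matchChars_eq_check (u b : String) (h : u.length = b.length) :
    matchChars u b = check u b := by
  unfold matchChars check
  rw [matchChars_pred]
  simp [PySem.Str.len, h]

-- a star-free pattern matches exactly the equal strings
theorem check_of_no_star (b : String) (hs : '*' ∉ b.toList) (u : String) :
    (u == b) = check u b := by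
  have hz : ∀ (us bs : List Char), us.length = bs.length → '*' ∉ bs →
      ((us.zip bs).all (fun p => !(p.1 != p.2 && p.2 != '*')) = true ↔ us = bs) := by
    intro us
    induction us with
    | nil =>
      intro bs hl _
      cases bs with
      | nil => simp
      | cons c cs => simp at hl
    | cons a us ih =>
      intro bs hl hsb
      cases bs with
      | nil => simp at hl
      | cons c cs =>
        have hsc : c ≠ '*' := fun hc => hsb (hc ▸ List.mem_cons_self)
        have hss : '*' ∉ cs := fun hc => hsb (List.mem_cons_of_mem c hc)
        simp only [List.zip_cons_cons, List.all_cons, Bool.and_eq_true, List.cons.injEq]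
        rw [ih cs (by simpa using hl) hss]
        constructor
        · rintro ⟨h1, h2⟩
          refine ⟨?_, h2⟩
          cases hac : a == c with
          | true => exact eq_of_beq hac
          | false =>
            exfalso
            simp only [bne, hac, Bool.not_false, Bool.true_and, Bool.not_eq_eq_eq_not,
              Bool.not_true] at h1
            exact hsc (eq_of_beq (by simpa using h1))
        · rintro ⟨rfl, h2⟩
          exact ⟨by simp, h2⟩
  by_cases hl : u.length = b.length
  · unfold check
    simp only [PySem.Str.len, String.length_toList]
    rw [if_neg (by simp [hl])]
    have hiff := hz u.toList b.toList (by simp [String.length_toList, hl]) hs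
    cases hall : (u.toList.zip b.toList).all (fun p => !(p.1 != p.2 && p.2 != '*')) with
    | true =>
      have heq : u = b := String.toList_inj.mp (hiff.1 hall)
      simp [heq]
    | false =>
      have hne : u ≠ b := by
        intro he
        subst he
        rw [← Bool.not_eq_true] at hall
        exact hall (hiff.2 rfl)
      simp [hne]
  · unfold check
    have hcond : PySem.Str.len u ≠ PySem.Str.len b := by
      simp only [PySem.Str.len, String.length_toList, ne_eq, Nat.cast_inj]
      exact hl
    rw [if_pos hcond]
    exact beq_eq_false_iff_ne.2 fun he => hl (he ▸ rfl)

-- product of a list extended on the right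
theorem pyProduct_append_singleton (ls : List (List String)) (c : List String) :
    pyProduct (ls ++ [c]) = (pyProduct ls).flatMap (fun t => c.map (fun u => t ++ [u])) := by
  induction ls with
  | nil =>
    simp only [List.nil_append, pyProduct]
    simp only [List.flatMap_cons, List.flatMap_nil, List.map_cons, List.map_nil, List.append_nil,
      List.nil_append]
    induction c with
    | nil => rfl
    | cons a c ihc => simp only [List.flatMap_cons, List.map_cons, ihc]; rfl
  | cons a ls ih =>
    simp only [List.cons_append, pyProduct, ih]
    simp [List.flatMap_assoc, List.flatMap_map, List.map_flatMap, List.map_map,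
      Function.comp_def, List.cons_append]

-- a position with no candidates kills the whole product
theorem pyProduct_of_mem_nil (ls : List (List String)) (h : [] ∈ ls) : pyProduct ls = [] := by
  induction ls with
  | nil => exact absurd h (List.not_mem_nil)
  | cons a ls ih =>
    rcases List.mem_cons.1 h with ha | hl
    · rw [pyProduct, ← ha]
      rfl
    · rw [pyProduct, ih hl]
      simp

-- membership in B's inner candidate loop
theorem mem_innerB (c used : List String) :
    ∀ (s : PySem.Set (List String)) (y : List String),
    (y ∈ c.foldl (fun nxt2 u => if u ∈ used then nxt2 else PySem.Set.add nxt2 (canonFS (used ++ [u]))) s)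
      ↔ y ∈ s ∨ ∃ u ∈ c, u ∉ used ∧ y = canonFS (used ++ [u]) := by
  induction c with
  | nil => simp
  | cons a c ih =>
    intro s y
    simp only [List.foldl_cons]
    by_cases ha : a ∈ used
    · rw [if_pos ha, ih]
      constructor
      · rintro (h | ⟨u, hu, hnu, he⟩)
        · exact Or.inl h
        · exact Or.inr ⟨u, List.mem_cons_of_mem a hu, hnu, he⟩
      · rintro (h | ⟨u, hu, hnu, he⟩)
        · exact Or.inl h
        · rcases List.mem_cons.1 hu with rfl | hu'
          · exact absurd ha hnu
          · exact Or.inr ⟨u, hu', hnu, he⟩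
    · rw [if_neg ha, ih]
      constructor
      · rintro (h | ⟨u, hu, hnu, he⟩)
        · rcases (PySem.Set.mem_add _ _ _).1 h with h' | h'
          · exact Or.inl h'
          · exact Or.inr ⟨a, List.mem_cons_self, ha, h'⟩
        · exact Or.inr ⟨u, List.mem_cons_of_mem a hu, hnu, he⟩
      · rintro (h | ⟨u, hu, hnu, he⟩)
        · exact Or.inl ((PySem.Set.mem_add _ _ _).2 (Or.inl h))
        · rcases List.mem_cons.1 hu with rfl | hu'
          · exact Or.inl ((PySem.Set.mem_add _ _ _).2 (Or.inr he))
          · exact Or.inr ⟨u, hu', hnu, he⟩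

-- membership in B's per-level loop
theorem mem_outerB (part : List (List String)) (c : List String) :
    ∀ (s : PySem.Set (List String)) (y : List String),
    (y ∈ part.foldl (fun nxt used =>
        c.foldl (fun nxt2 u => if u ∈ used then nxt2 else PySem.Set.add nxt2 (canonFS (used ++ [u]))) nxt) s)
      ↔ y ∈ s ∨ ∃ used ∈ part, ∃ u ∈ c, u ∉ used ∧ y = canonFS (used ++ [u]) := by
  induction part with
  | nil => simp
  | cons w part ih =>
    intro s y
    simp only [List.foldl_cons]
    rw [ih, mem_innerB]
    constructor
    · rintro ((h | ⟨u, hu, hnu, he⟩) | ⟨used, hw, rest⟩)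
      · exact Or.inl h
      · exact Or.inr ⟨w, List.mem_cons_self, u, hu, hnu, he⟩
      · exact Or.inr ⟨used, List.mem_cons_of_mem w hw, rest⟩
    · rintro (h | ⟨used, hw, rest⟩)
      · exact Or.inl (Or.inl h)
      · rcases List.mem_cons.1 hw with rfl | hw'
        · exact Or.inl (Or.inr rest)
        · exact Or.inr ⟨used, hw', rest⟩

-- B's level sets stay duplicate-free
theorem nodup_innerB (c used : List String) :
    ∀ (s : PySem.Set (List String)), s.Nodup →
    (c.foldl (fun nxt2 u => if u ∈ used then nxt2 else PySem.Set.add nxt2 (canonFS (used ++ [u]))) s).Nodup := by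
  induction c with
  | nil => intro s hs; exact hs
  | cons a c ih =>
    intro s hs
    simp only [List.foldl_cons]
    by_cases ha : a ∈ used
    · rw [if_pos ha]; exact ih s hs
    · rw [if_neg ha]; exact ih _ (PySem.Set.nodup_add _ _ hs)

theorem nodup_outerB (part : List (List String)) (c : List String) :
    ∀ (s : PySem.Set (List String)), s.Nodup →
    (part.foldl (fun nxt used =>
        c.foldl (fun nxt2 u => if u ∈ used then nxt2 else PySem.Set.add nxt2 (canonFS (used ++ [u]))) nxt) s).Nodup := by
  induction part with
  | nil => intro s hs; exact hs
  | cons w part ih =>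
    intro s hs
    simp only [List.foldl_cons]
    exact ih _ (nodup_innerB c w s hs)

-- B's level-by-level fold computes exactly the canonical images of the duplicate-free product tuples
theorem bfs_fold (cs : List (List String)) :
    (∀ x, x ∈ cs.foldl (fun part c =>
        part.foldl (fun nxt used =>
          c.foldl (fun nxt2 u => if u ∈ used then nxt2 else PySem.Set.add nxt2 (canonFS (used ++ [u]))) nxt)
          PySem.Set.empty) [([] : List String)]
      ↔ ∃ t, t ∈ pyProduct cs ∧ t.Nodup ∧ x = canonFS t)
    ∧ (cs.foldl (fun part c =>
        part.foldl (fun nxt used =>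
          c.foldl (fun nxt2 u => if u ∈ used then nxt2 else PySem.Set.add nxt2 (canonFS (used ++ [u]))) nxt)
          PySem.Set.empty) [([] : List String)]).Nodup := by
  induction cs using List.reverseRecOn with
  | nil =>
    constructor
    · intro x
      simp [pyProduct]
      constructor
      · rintro rfl; exact rfl
      · rintro rfl; rfl
    · simp
  | append_singleton ls c ih =>
    rw [List.foldl_append, List.foldl_cons, List.foldl_nil]
    constructor
    · intro x
      rw [mem_outerB]
      rw [pyProduct_append_singleton]
      constructor
      · rintro (h | ⟨used, hused, u, hu, hnu, he⟩)
        · exact absurd h (List.not_mem_nil)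
        · obtain ⟨t, htp, htn, rfl⟩ := (ih.1 used).1 hused
          have hut : u ∉ t := fun hc => hnu ((mem_canonFS u t).2 hc)
          refine ⟨t ++ [u], ?_, ?_, ?_⟩
          · exact List.mem_flatMap.2 ⟨t, htp, List.mem_map.2 ⟨u, hu, rfl⟩⟩
          · rw [List.nodup_append]
            refine ⟨htn, List.nodup_singleton u, ?_⟩
            intro a ha b hb
            have hbu : b = u := List.mem_singleton.1 hb
            subst hbu
            exact fun hab => hut (hab ▸ ha)
          · rw [he]
            refine canonFS_congr fun y => ?_
            simp only [List.mem_append, List.mem_singleton, mem_canonFS]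
      · rintro ⟨t', ht', htn', rfl⟩
        obtain ⟨t, htp, hmap⟩ := List.mem_flatMap.1 ht'
        obtain ⟨u, hu, rfl⟩ := List.mem_map.1 hmap
        have htn : t.Nodup := (List.nodup_append.1 htn').1
        have hut : u ∉ t := by
          intro hc
          rcases List.nodup_append.1 htn' with ⟨_, _, hdisj⟩
          exact hdisj _ hc _ (List.mem_singleton.2 rfl) rfl
        refine Or.inr ⟨canonFS t, (ih.1 (canonFS t)).2 ⟨t, htp, htn, rfl⟩, u, hu,
          fun hc => hut ((mem_canonFS u t).1 hc), ?_⟩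
        refine canonFS_congr fun y => ?_
        simp only [List.mem_append, List.mem_singleton, mem_canonFS]
    · exact nodup_outerB _ c PySem.Set.empty List.nodup_nil

-- B's candidate-cache loop: every processed pattern holds its value F
theorem foldCand (F : String → List String) (L : List String) :
    ∀ (d : PySem.Dict String (List String)),
    (∀ k, d.contains k = true → d.getD k [] = F k) →
    (∀ k, (L.foldl (fun d b => if d.contains b then d else d.insert b (F b)) d).contains k = true →
        (L.foldl (fun d b => if d.contains b then d else d.insert b (F b)) d).getD k [] = F k) ∧
    (∀ b ∈ L, (L.foldl (fun d b => if d.contains b then d else d.insert b (F b)) d).contains b = true) := by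
  induction L with
  | nil => intro d hd; exact ⟨hd, fun b hb => absurd hb (List.not_mem_nil)⟩
  | cons a L ih =>
    intro d hd
    simp only [List.foldl_cons]
    have hstep : ∀ k, ((if d.contains a then d else d.insert a (F a)).contains k = true →
        (if d.contains a then d else d.insert a (F a)).getD k [] = F k) := by
      intro k
      by_cases hca : d.contains a = true
      · rw [if_pos hca]; exact hd k
      · rw [if_neg hca]
        intro hk
        rw [PySem.Dict.getD_insert]
        by_cases hka : k = a
        · rw [if_pos hka, hka]
        · rw [if_neg hka]
          apply hd
          rw [PySem.Dict.contains_insert] at hk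
          rcases Bool.or_eq_true_iff.1 hk with h | h
          · exact absurd (eq_of_beq h) hka
          · exact h
    have hmono : ((if d.contains a then d else d.insert a (F a)).contains a = true) := by
      by_cases hca : d.contains a = true
      · rw [if_pos hca]; exact hca
      · rw [if_neg hca]; exact PySem.Dict.contains_insert_self _ _ _
    refine ⟨(ih _ hstep).1, fun b hb => ?_⟩
    rcases List.mem_cons.1 hb with rfl | hbL
    · -- contains is preserved by the rest of the fold
      have hpres : ∀ (M : List String) (d' : PySem.Dict String (List String)),
          d'.contains b = true →
          (M.foldl (fun d c => if d.contains c then d else d.insert c (F c)) d').contains b = true := by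
        intro M
        induction M with
        | nil => intro d' h; exact h
        | cons m M ihM =>
          intro d' h
          simp only [List.foldl_cons]
          apply ihM
          by_cases hcm : d'.contains m = true
          · rw [if_pos hcm]; exact h
          · rw [if_neg hcm]
            rw [PySem.Dict.contains_insert, h]
            simp
      exact hpres L _ hmono
    · exact (ih _ hstep).2 b hbL

-- B's combined candidate test equals A's check
theorem matchChars_and_len (u b : String) :
    (matchChars u b && (PySem.Str.len u == PySem.Str.len b)) = check u b := by
  by_cases hl : u.length = b.length
  · have h1 : (PySem.Str.len u == PySem.Str.len b) = true := by
      simp [PySem.Str.len, String.length_toList, hl]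
    rw [h1, Bool.and_true, matchChars_eq_check u b hl]
  · have h1 : (PySem.Str.len u == PySem.Str.len b) = false := by
      simp [PySem.Str.len, String.length_toList]
      exact fun h => absurd h hl
    have h2 : check u b = false := by
      unfold check
      rw [if_pos]
      simp only [PySem.Str.len, String.length_toList, ne_eq, Nat.cast_inj]
      exact hl
    rw [h1, Bool.and_false, h2]

-- the two programs agree everywhere
set_option maxHeartbeats 1600000 in
theorem sol_eq (user_id banned_id : List String) :
    solution user_id banned_id = solution_alt user_id banned_id := by
  simp only [solution, solution_alt]
  -- A's candidate lists are the check-filters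
  have hAmap : banned_id.map (fun b_id =>
      (banned_id.foldl (fun d b_id =>
        if d.getD b_id [] ≠ [] then d
        else user_id.foldl (fun d' u => if check u b_id then d'.modify b_id [] (fun l => l ++ [u]) else d') d)
        (banned_id.foldl (fun d id => d.insert id []) PySem.Dict.empty)).getD b_id [])
      = banned_id.map (fun b => user_id.filter (fun u => check u b)) := by
    apply List.map_congr_left
    intro b hb
    have h0 : ∀ k : String,
        (PySem.Dict.empty : PySem.Dict String (List String)).getD k [] = [] := by
      intro k; simp [pysem]
    exact (fold2 user_id banned_id
        (banned_id.foldl (fun d id => d.insert id []) PySem.Dict.empty)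
        (fun k => Or.inl (tmp0_getD banned_id PySem.Dict.empty h0 k))).2 b (Or.inl hb)
  -- B's cached candidate lists are the check-filters too
  have hBstep : (fun (d : PySem.Dict String (List String)) b =>
      if d.contains b then d
      else if PySem.Str.isIn "*" b then
        d.insert b (((user_id.foldl (fun d u => d.modify (PySem.Str.len u) [] (fun l => l ++ [u])) PySem.Dict.empty).getD (PySem.Str.len b) []).filter (fun u => matchChars u b))
      else d.insert b ((user_id.foldl (fun d u => d.modify u [] (fun l => l ++ [u])) PySem.Dict.empty).getD b []))
      = (fun (d : PySem.Dict String (List String)) b =>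
        if d.contains b then d else d.insert b (user_id.filter (fun u => check u b))) := by
    funext d b
    by_cases hc : d.contains b = true
    · rw [if_pos hc, if_pos hc]
    · rw [if_neg hc, if_neg hc]
      by_cases hstar : PySem.Str.isIn "*" b = true
      · rw [if_pos hstar]
        congr 1
        rw [group_getD (key := PySem.Str.len) user_id (PySem.Str.len b) PySem.Dict.empty]
        rw [show (PySem.Dict.empty : PySem.Dict Int (List String)).getD (PySem.Str.len b) [] = [] from by simp [pysem]]
        rw [List.nil_append, List.filter_filter]
        exact List.filter_congr (fun u _ => matchChars_and_len u b)
      · rw [if_neg hstar]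
        congr 1
        rw [group_getD (key := fun u => u) user_id b PySem.Dict.empty]
        rw [show (PySem.Dict.empty : PySem.Dict String (List String)).getD b [] = [] from by simp [pysem]]
        rw [List.nil_append]
        have hs : '*' ∉ b.toList := by
          intro hmem
          have : PySem.Chars.isIn "*".toList b.toList = true := by
            rw [PySem.Chars.isIn_iff_infix]
            exact (List.singleton_infix_iff '*' b.toList).mpr hmem
          have h2 : PySem.Str.isIn "*" b = true := by
            rw [PySem.Str.isIn_eq]; exact this
          exact hstar h2
        exact List.filter_congr (fun u _ => check_of_no_star b hs u)
  rw [hBstep]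
  have hcandB : ∀ b ∈ banned_id,
      (banned_id.foldl (fun (d : PySem.Dict String (List String)) b =>
        if d.contains b then d else d.insert b (user_id.filter (fun u => check u b))) PySem.Dict.empty).getD b []
      = user_id.filter (fun u => check u b) := by
    intro b hb
    have h0 : ∀ k : String, (PySem.Dict.empty : PySem.Dict String (List String)).contains k = true →
        (PySem.Dict.empty : PySem.Dict String (List String)).getD k [] = user_id.filter (fun u => check u k) := by
      intro k hk
      simp [pysem] at hk
    have hf := foldCand (fun b => user_id.filter (fun u => check u b)) banned_id PySem.Dict.empty h0
    exact hf.1 b (hf.2 b hb)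
  -- rewrite A's side to the canonical set of duplicate-free product tuples
  rw [hAmap, foldA]
  rw [show (PySem.Set.empty : PySem.Set (List String)) = ([] : List (List String)) from rfl]
  rw [← PySem.Set.ofList_eq_foldl]
  -- the emptiness guard
  rw [PySem.List.any_congr_mem (g := fun b => (user_id.filter (fun u => check u b)).isEmpty)
    (fun b hb => congrArg List.isEmpty (hcandB b hb))]
  by_cases hany : banned_id.any (fun b => (user_id.filter (fun u => check u b)).isEmpty) = true
  · rw [if_pos hany]
    obtain ⟨b, hb, hemp⟩ := List.any_eq_true.1 hany
    have hmem : ([] : List String) ∈ banned_id.map (fun b => user_id.filter (fun u => check u b)) :=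
      List.mem_map.2 ⟨b, hb, (List.isEmpty_iff.1 hemp).symm ▸ rfl⟩
    rw [pyProduct_of_mem_nil _ hmem]
    simp
  · rw [if_neg hany]
    have hcong : ∀ (acc : PySem.Set (List String)) (b : String), b ∈ banned_id →
        List.foldl (fun nxt used =>
          List.foldl (fun nxt2 u => if u ∈ used then nxt2 else PySem.Set.add nxt2 (canonFS (used ++ [u]))) nxt
            ((List.foldl (fun (d : PySem.Dict String (List String)) b =>
                if d.contains b then d else d.insert b (List.filter (fun u => check u b) user_id))
              PySem.Dict.empty banned_id).getD b []))
          ([] : PySem.Set (List String)) acc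
      = List.foldl (fun nxt used =>
          List.foldl (fun nxt2 u => if u ∈ used then nxt2 else PySem.Set.add nxt2 (canonFS (used ++ [u]))) nxt
            (List.filter (fun u => check u b) user_id))
          ([] : PySem.Set (List String)) acc := by
      intro acc b hb
      rw [hcandB b hb]
    have hfold : List.foldl (fun (part : PySem.Set (List String)) b =>
        List.foldl (fun nxt used =>
          List.foldl (fun nxt2 u => if u ∈ used then nxt2 else PySem.Set.add nxt2 (canonFS (used ++ [u]))) nxt
            ((List.foldl (fun (d : PySem.Dict String (List String)) b =>
                if d.contains b then d else d.insert b (List.filter (fun u => check u b) user_id))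
              PySem.Dict.empty banned_id).getD b []))
          ([] : PySem.Set (List String)) part) [([] : List String)] banned_id
      = List.foldl (fun (part : PySem.Set (List String)) (c : List String) =>
        List.foldl (fun nxt used =>
          List.foldl (fun nxt2 u => if u ∈ used then nxt2 else PySem.Set.add nxt2 (canonFS (used ++ [u]))) nxt c)
          ([] : PySem.Set (List String)) part) [([] : List String)]
        (banned_id.map (fun b => List.filter (fun u => check u b) user_id)) :=
      (PySem.List.foldl_congr_mem banned_id _ _ [([] : List String)] hcong).trans
        ((List.foldl_map (f := fun b => List.filter (fun u => check u b) user_id)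
          (g := fun (part : PySem.Set (List String)) (c : List String) =>
            List.foldl (fun nxt used =>
              List.foldl (fun nxt2 u => if u ∈ used then nxt2 else PySem.Set.add nxt2 (canonFS (used ++ [u]))) nxt c)
              ([] : PySem.Set (List String)) part)
          (l := banned_id) (init := [([] : List String)])).symm)
    rw [hfold]
    have hb := bfs_fold (banned_id.map (fun b => List.filter (fun u => check u b) user_id))
    have hperm : (PySem.Set.ofList
        ((((pyProduct (banned_id.map (fun b => List.filter (fun u => check u b) user_id))).filter
          (fun t => decide t.Nodup)).map canonFS))).Perm
        ((banned_id.map (fun b => List.filter (fun u => check u b) user_id)).foldl (fun part c =>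
          part.foldl (fun nxt used =>
            c.foldl (fun nxt2 u =>
              if u ∈ used then nxt2 else PySem.Set.add nxt2 (canonFS (used ++ [u]))) nxt)
            ([] : PySem.Set (List String))) [([] : List String)]) := by
      refine (List.perm_ext_iff_of_nodup (PySem.Set.nodup_ofList _) hb.2).2 fun x => ?_
      rw [PySem.Set.mem_ofList, hb.1 x]
      simp only [List.mem_map, List.mem_filter, decide_eq_true_eq]
      constructor
      · rintro ⟨t, ⟨htp, htn⟩, rfl⟩
        exact ⟨t, htp, htn, rfl⟩
      · rintro ⟨t, htp, htn, rfl⟩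
        exact ⟨t, ⟨htp, htn⟩, rfl⟩
    exact_mod_cast hperm.length_eq

theorem solution_spec : Claim_equal_solution := by
  intro user_id banned_id _
  unfold Spec_solution
  exact sol_eq user_id banned_id
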